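-- pv_equiv track=rewrite | github.com/TobiasWinker/QC4DB_QO | util/joinHelper.py | generatePossibleJoins
-- ===== SOURCE A (Python) =====
-- def generatePossibleJoins(tables, relations, n=4):
--     joins = {2: []}
--     # 2 joins
--     for key in relations.keys():
--         joins[2].append(list(key))
--     # n joins
--     for nJoins in range(3, n + 1):
--         joins[nJoins] = []
--         for t in tables:
--             for i, j in enumerate(joins[nJoins - 1]):
--                 if not t in j:
--                     for r in joins[2]:
--                         if (t == r[0] and r[1] in j) or (t == r[1] and r[0] in j):
--                             newList = j.copy()
--                             newList.append(t)
--                             newList.sort()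
--                             if not newList in joins[nJoins]:
--                                 joins[nJoins].append(newList)
--         joins[nJoins].sort()
--     return joins
-- ===== SOURCE B (Python) =====
-- def generatePossibleJoins(tables, relations, n=4):
--     # adjacency index: table -> set of directly related tables
--     adj = {}
--     for a, b in relations.keys():
--         adj.setdefault(a, set()).add(b)
--         adj.setdefault(b, set()).add(a)
--     tset = set(tables)
--     joins = {2: [list(key) for key in relations.keys()]}
--     prev = joins[2]
--     for level in range(3, n + 1):
--         found = set()
--         for j in prev:
--             for m in j:
--                 for t in adj.get(m, ()):
--                     if t in tset and t not in j:
--                         found.add(tuple(sorted(j + [t])))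
--         prev = [list(tp) for tp in sorted(found)]
--         joins[level] = prev
--     return joins
-- ===== Notes on version B (the rewrite author's own statement) =====
-- stated objective: faster
-- what changed: B builds an adjacency index (table -> set of directly related tables) once and expands each prior join by walking its members' neighbours into a per-level dedup set, instead of A's per-level scan of every table against every prior join against every relation with a linear duplicate check on the growing level list.
import Mathlib
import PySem

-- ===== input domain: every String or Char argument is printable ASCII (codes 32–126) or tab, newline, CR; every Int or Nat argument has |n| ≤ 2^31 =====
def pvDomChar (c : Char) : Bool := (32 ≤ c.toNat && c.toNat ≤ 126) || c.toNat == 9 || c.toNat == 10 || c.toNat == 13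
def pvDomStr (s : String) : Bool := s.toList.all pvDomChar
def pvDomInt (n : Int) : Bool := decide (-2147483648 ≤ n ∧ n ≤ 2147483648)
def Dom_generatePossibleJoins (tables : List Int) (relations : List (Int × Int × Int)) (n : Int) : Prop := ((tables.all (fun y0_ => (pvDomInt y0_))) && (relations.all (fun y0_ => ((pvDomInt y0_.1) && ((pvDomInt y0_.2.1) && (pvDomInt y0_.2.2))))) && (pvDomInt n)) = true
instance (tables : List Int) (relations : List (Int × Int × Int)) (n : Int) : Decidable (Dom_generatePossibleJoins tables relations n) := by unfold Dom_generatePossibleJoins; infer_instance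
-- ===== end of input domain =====

-- B replaces A's per-level scan of all tables against all relations by an adjacency index
-- (table -> set of directly related tables) and a neighbour-driven expansion of each prior
-- join into a per-level dedup set; objective: faster (measured).

-- ===== PORT A =====
-- relations.keys() (the dict's distinct keys, insertion order); shared by both ports
def pvKeys (relations : List (Int × Int × Int)) : List (Int × Int) :=
  (PySem.Dict.ofList (relations.map (fun r => ((r.1, r.2.1), r.2.2)))).keys

-- 'for r in joins[2]: if (t == r[0] and r[1] in j) or (t == r[1] and r[0] in j): …'
-- r always has length 2, so r[0]/r[1] are in range: pyGetD is exact here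
def pvA_inner (t : Int) (j : List Int) (rs : List (List Int)) (lvl : List (List Int)) : List (List Int) :=
  rs.foldl (fun lvl r =>
    if (t = PySem.List.pyGetD r 0 0 ∧ PySem.List.pyGetD r 1 0 ∈ j) ∨
       (t = PySem.List.pyGetD r 1 0 ∧ PySem.List.pyGetD r 0 0 ∈ j) then
      let newList := PySem.List.sorted (j ++ [t]) (fun x => x) false
      if newList ∈ lvl then lvl else lvl ++ [newList]
    else lvl) lvl

-- one iteration of 'for nJoins in range(3, n+1)': build joins[nJoins] and sort it
def pvA_level (tables : List Int) (joins2 : List (List Int)) (prev : List (List Int)) : List (List Int) :=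
  PySem.List.sorted
    (tables.foldl (fun lvl t =>
      (PySem.List.enumerate prev 0).foldl (fun lvl ij =>
        if t ∈ ij.2 then lvl else pvA_inner t ij.2 joins2 lvl) lvl) [])
    (fun x => x) false

def generatePossibleJoins (tables : List Int) (relations : List (Int × Int × Int)) (n : Int) : List (Int × List (List Int)) :=
  let joins2 := (pvKeys relations).foldl (fun acc k => acc ++ [[k.1, k.2]]) []
  ((PySem.List.pyRange 3 (n + 1) 1).foldl
      (fun joins nJ => joins.insert nJ (pvA_level tables joins2 (joins.getD (nJ - 1) [])))
      ((PySem.Dict.empty : PySem.Dict Int (List (List Int))).insert 2 joins2)).items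

-- ===== PORT B =====
-- adjacency index: for each key (a,b): adj.setdefault(a,set()).add(b); adj.setdefault(b,set()).add(a)
def pvB_adj (keys : List (Int × Int)) : PySem.Dict Int (PySem.Set Int) :=
  keys.foldl (fun adj k =>
    let adj := adj.insert k.1 (PySem.Set.add (adj.getD k.1 PySem.Set.empty) k.2)
    adj.insert k.2 (PySem.Set.add (adj.getD k.2 PySem.Set.empty) k.1)) PySem.Dict.empty

-- per-level dedup set: for j in prev, for m in j, for t in adj.get(m, ()): …
-- (found's own order is consumed only by the keyless sorted below, where order cannot matter)
def pvB_found (adj : PySem.Dict Int (PySem.Set Int)) (tset : PySem.Set Int) (prev : List (List Int)) : PySem.Set (List Int) :=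
  prev.foldl (fun found j =>
    j.foldl (fun found m =>
      (adj.getD m []).foldl (fun found t =>
        if t ∈ tset ∧ t ∉ j then
          PySem.Set.add found (PySem.List.sorted (j ++ [t]) (fun x => x) false)
        else found) found) found) PySem.Set.empty

def pvB_level (adj : PySem.Dict Int (PySem.Set Int)) (tset : PySem.Set Int) (prev : List (List Int)) : List (List Int) :=
  PySem.List.sorted (pvB_found adj tset prev) (fun x => x) false

def generatePossibleJoins_alt (tables : List Int) (relations : List (Int × Int × Int)) (n : Int) : List (Int × List (List Int)) :=
  let keys := pvKeys relations
  let adj := pvB_adj keys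
  let tset := PySem.Set.ofList tables
  let joins2 := keys.map (fun k => [k.1, k.2])
  ((PySem.List.pyRange 3 (n + 1) 1).foldl
      (fun (st : PySem.Dict Int (List (List Int)) × List (List Int)) level =>
        let prev' := pvB_level adj tset st.2
        (st.1.insert level prev', prev'))
      ((PySem.Dict.empty : PySem.Dict Int (List (List Int))).insert 2 joins2, joins2)).1.items

-- ===== PRECONDITION & SPEC =====
def Spec_generatePossibleJoins (tables : List Int) (relations : List (Int × Int × Int)) (n : Int) (out : List (Int × List (List Int))) : Prop := out = generatePossibleJoins_alt tables relations n
instance (tables : List Int) (relations : List (Int × Int × Int)) (n : Int) (out : List (Int × List (List Int))) : Decidable (Spec_generatePossibleJoins tables relations n out) := by unfold Spec_generatePossibleJoins; infer_instance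

-- ===== CLAIM (what is proved, stated in full; the proofs are below) =====
def Claim_equal_generatePossibleJoins : Prop := ∀ (tables : List Int) (relations : List (Int × Int × Int)) (n : Int), Dom_generatePossibleJoins tables relations n → Spec_generatePossibleJoins tables relations n (generatePossibleJoins tables relations n)

-- ===== LEMMAS AND PROOFS =====

-- the sorted candidate list built from j and t
def pvNew (j : List Int) (t : Int) : List Int := PySem.List.sorted (j ++ [t]) (fun x => x) false

-- A's test on a level-2 entry r
def pvCondA (t : Int) (j : List Int) (r : List Int) : Prop :=
  (t = PySem.List.pyGetD r 0 0 ∧ PySem.List.pyGetD r 1 0 ∈ j) ∨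
  (t = PySem.List.pyGetD r 1 0 ∧ PySem.List.pyGetD r 0 0 ∈ j)

theorem pv_pyGetD_pair1 (a b : Int) : PySem.List.pyGetD [a, b] 1 0 = b := by
  simp [PySem.List.pyGetD, PySem.List.pyGet?, PySem.List.pyIdx?]

theorem pvCondA_pair (t : Int) (j : List Int) (a b : Int) :
    pvCondA t j [a, b] ↔ (t = a ∧ b ∈ j) ∨ (t = b ∧ a ∈ j) := by
  simp [pvCondA, pv_pyGetD_pair1]

-- A's inner relation scan: membership characterisation
theorem pvA_inner_mem (t : Int) (j : List Int) (rs : List (List Int)) (lvl : List (List Int)) (x : List Int) :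
    x ∈ pvA_inner t j rs lvl ↔ x ∈ lvl ∨ (x = pvNew j t ∧ ∃ r ∈ rs, pvCondA t j r) := by
  induction rs generalizing lvl with
  | nil => simp [pvA_inner]
  | cons r rs ih =>
    have hstep : pvA_inner t j (r :: rs) lvl = pvA_inner t j rs
        (if (t = PySem.List.pyGetD r 0 0 ∧ PySem.List.pyGetD r 1 0 ∈ j) ∨
            (t = PySem.List.pyGetD r 1 0 ∧ PySem.List.pyGetD r 0 0 ∈ j) then
          (if PySem.List.sorted (j ++ [t]) (fun x => x) false ∈ lvl then lvl
           else lvl ++ [PySem.List.sorted (j ++ [t]) (fun x => x) false])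
         else lvl) := rfl
    rw [hstep, ih]
    by_cases hc : (t = PySem.List.pyGetD r 0 0 ∧ PySem.List.pyGetD r 1 0 ∈ j) ∨
        (t = PySem.List.pyGetD r 1 0 ∧ PySem.List.pyGetD r 0 0 ∈ j)
    · rw [if_pos hc]
      by_cases hm : PySem.List.sorted (j ++ [t]) (fun x => x) false ∈ lvl
      · rw [if_pos hm]
        simp only [List.mem_cons, pvNew]
        constructor
        · rintro (h | ⟨rfl, r', hr', hcr'⟩)
          · exact Or.inl h
          · exact Or.inr ⟨rfl, r', Or.inr hr', hcr'⟩
        · rintro (h | ⟨rfl, r', hr' | hr', hcr'⟩)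
          · exact Or.inl h
          · exact Or.inl hm
          · exact Or.inr ⟨rfl, r', hr', hcr'⟩
      · rw [if_neg hm]
        simp only [List.mem_append, List.mem_cons, List.not_mem_nil, or_false, pvNew]
        constructor
        · rintro ((h | h) | ⟨rfl, r', hr', hcr'⟩)
          · exact Or.inl h
          · exact Or.inr ⟨h, r, Or.inl rfl, hc⟩
          · exact Or.inr ⟨rfl, r', Or.inr hr', hcr'⟩
        · rintro (h | ⟨rfl, r', hr' | hr', hcr'⟩)
          · exact Or.inl (Or.inl h)
          · exact Or.inl (Or.inr rfl)
          · exact Or.inr ⟨rfl, r', hr', hcr'⟩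
    · rw [if_neg hc]
      simp only [List.mem_cons]
      constructor
      · rintro (h | ⟨rfl, r', hr', hcr'⟩)
        · exact Or.inl h
        · exact Or.inr ⟨rfl, r', Or.inr hr', hcr'⟩
      · rintro (h | ⟨rfl, r', hr' | hr', hcr'⟩)
        · exact Or.inl h
        · exact absurd (hr' ▸ hcr' : pvCondA t j r) hc
        · exact Or.inr ⟨rfl, r', hr', hcr'⟩

theorem pvA_inner_nodup (t : Int) (j : List Int) (rs : List (List Int)) (lvl : List (List Int))
    (h : lvl.Nodup) : (pvA_inner t j rs lvl).Nodup := by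
  induction rs generalizing lvl with
  | nil => simpa [pvA_inner] using h
  | cons r rs ih =>
    have hstep : pvA_inner t j (r :: rs) lvl = pvA_inner t j rs
        (if (t = PySem.List.pyGetD r 0 0 ∧ PySem.List.pyGetD r 1 0 ∈ j) ∨
            (t = PySem.List.pyGetD r 1 0 ∧ PySem.List.pyGetD r 0 0 ∈ j) then
          (if PySem.List.sorted (j ++ [t]) (fun x => x) false ∈ lvl then lvl
           else lvl ++ [PySem.List.sorted (j ++ [t]) (fun x => x) false])
         else lvl) := rfl
    rw [hstep]
    split_ifs with hc hm
    · exact ih _ h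
    · exact ih _ (by
        simp only [List.nodup_append, List.nodup_singleton, true_and]
        refine ⟨h, ?_⟩
        intro a ha b hb hab
        simp only [List.mem_singleton] at hb
        exact hm (by rw [hab, hb] at ha; exact ha))
    · exact ih _ h

-- folding over 'enumerate prev' with a body that only uses the element is a fold over prev
theorem pvFoldl_enumerate {β : Type} (g : β → List Int → β) (prev : List (List Int)) (s : Int) (a : β) :
    (PySem.List.enumerate prev s).foldl (fun a p => g a p.2) a = prev.foldl g a := by
  induction prev generalizing s a with
  | nil => rfl
  | cons y ys ih => simp [PySem.List.enumerate, ih]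

-- A's scan of the previous level, for a fixed t
theorem pvA_prevfold_mem (t : Int) (rs : List (List Int)) (prev lvl : List (List Int)) (x : List Int) :
    x ∈ prev.foldl (fun lvl j => if t ∈ j then lvl else pvA_inner t j rs lvl) lvl ↔
      x ∈ lvl ∨ ∃ j ∈ prev, t ∉ j ∧ x = pvNew j t ∧ ∃ r ∈ rs, pvCondA t j r := by
  induction prev generalizing lvl with
  | nil => simp
  | cons j js ih =>
    simp only [List.foldl_cons]
    split_ifs with hj
    · rw [ih]
      simp only [List.mem_cons]
      constructor
      · rintro (h | ⟨j', hj', rest⟩)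
        · exact Or.inl h
        · exact Or.inr ⟨j', Or.inr hj', rest⟩
      · rintro (h | ⟨j', hj' | hj', hnt, rest⟩)
        · exact Or.inl h
        · exact absurd hj (hj' ▸ hnt)
        · exact Or.inr ⟨j', hj', hnt, rest⟩
    · rw [ih]
      simp only [pvA_inner_mem, List.mem_cons]
      constructor
      · rintro ((h | ⟨hx, hr⟩) | ⟨j', hj', rest⟩)
        · exact Or.inl h
        · exact Or.inr ⟨j, Or.inl rfl, hj, hx, hr⟩
        · exact Or.inr ⟨j', Or.inr hj', rest⟩
      · rintro (h | ⟨j', hj' | hj', hnt, hx, hr⟩)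
        · exact Or.inl (Or.inl h)
        · subst hj'; exact Or.inl (Or.inr ⟨hx, hr⟩)
        · exact Or.inr ⟨j', hj', hnt, hx, hr⟩

theorem pvA_prevfold_nodup (t : Int) (rs : List (List Int)) (prev lvl : List (List Int))
    (h : lvl.Nodup) :
    (prev.foldl (fun lvl j => if t ∈ j then lvl else pvA_inner t j rs lvl) lvl).Nodup := by
  induction prev generalizing lvl with
  | nil => simpa using h
  | cons j js ih =>
    simp only [List.foldl_cons]
    split_ifs with hj
    · exact ih _ h
    · exact ih _ (pvA_inner_nodup _ _ _ _ h)

-- the raw (pre-sort) level A builds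
def pvA_raw (tables : List Int) (rs prev : List (List Int)) : List (List Int) :=
  tables.foldl (fun lvl t =>
    prev.foldl (fun lvl j => if t ∈ j then lvl else pvA_inner t j rs lvl) lvl) []

theorem pvA_raw_mem_aux (tables : List Int) (rs prev lvl : List (List Int)) (x : List Int) :
    x ∈ tables.foldl (fun lvl t =>
        prev.foldl (fun lvl j => if t ∈ j then lvl else pvA_inner t j rs lvl) lvl) lvl ↔
      x ∈ lvl ∨ ∃ t ∈ tables, ∃ j ∈ prev, t ∉ j ∧ x = pvNew j t ∧ ∃ r ∈ rs, pvCondA t j r := by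
  induction tables generalizing lvl with
  | nil => simp
  | cons t ts ih =>
    simp only [List.foldl_cons]
    rw [ih, pvA_prevfold_mem]
    simp only [List.mem_cons]
    constructor
    · rintro ((h | ⟨j, hj, rest⟩) | ⟨t', ht', rest⟩)
      · exact Or.inl h
      · exact Or.inr ⟨t, Or.inl rfl, j, hj, rest⟩
      · exact Or.inr ⟨t', Or.inr ht', rest⟩
    · rintro (h | ⟨t', ht' | ht', rest⟩)
      · exact Or.inl (Or.inl h)
      · subst ht'; exact Or.inl (Or.inr rest)
      · exact Or.inr ⟨t', ht', rest⟩

theorem pvA_raw_mem (tables : List Int) (rs prev : List (List Int)) (x : List Int) :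
    x ∈ pvA_raw tables rs prev ↔
      ∃ t ∈ tables, ∃ j ∈ prev, t ∉ j ∧ x = pvNew j t ∧ ∃ r ∈ rs, pvCondA t j r := by
  simpa [pvA_raw] using pvA_raw_mem_aux tables rs prev [] x

theorem pvA_raw_nodup (tables : List Int) (rs prev : List (List Int)) : (pvA_raw tables rs prev).Nodup := by
  unfold pvA_raw
  generalize hl : ([] : List (List Int)) = lvl
  have h : lvl.Nodup := by rw [← hl]; exact List.nodup_nil
  clear hl
  induction tables generalizing lvl with
  | nil => simpa using h
  | cons t ts ih => exact ih _ (pvA_prevfold_nodup _ _ _ _ h)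

-- pvA_level is the sort of pvA_raw
theorem pvA_level_eq (tables : List Int) (joins2 prev : List (List Int)) :
    pvA_level tables joins2 prev = PySem.List.sorted (pvA_raw tables joins2 prev) (fun x => x) false := by
  unfold pvA_level pvA_raw
  congr 1
  generalize ([] : List (List Int)) = lvl
  induction tables generalizing lvl with
  | nil => rfl
  | cons t ts ih =>
    simp only [List.foldl_cons]
    rw [pvFoldl_enumerate (fun lvl j => if t ∈ j then lvl else pvA_inner t j joins2 lvl) prev 0]
    exact ih _

-- B's adjacency dict: membership characterisation
theorem pvB_adj_mem_aux (keys : List (Int × Int)) (d : PySem.Dict Int (PySem.Set Int)) (m t : Int) :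
    t ∈ (keys.foldl (fun adj k =>
        let adj := adj.insert k.1 (PySem.Set.add (adj.getD k.1 PySem.Set.empty) k.2)
        adj.insert k.2 (PySem.Set.add (adj.getD k.2 PySem.Set.empty) k.1)) d).getD m [] ↔
      t ∈ d.getD m [] ∨ ∃ k ∈ keys, (m = k.1 ∧ t = k.2) ∨ (m = k.2 ∧ t = k.1) := by
  induction keys generalizing d with
  | nil => simp
  | cons k ks ih =>
    simp only [List.foldl_cons]
    rw [ih]
    have hempty : ∀ (e : PySem.Dict Int (PySem.Set Int)) (z : Int),
        e.getD z PySem.Set.empty = e.getD z [] := fun e z => rfl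
    simp only [PySem.Dict.getD_insert, hempty, List.mem_cons]
    by_cases h1 : m = k.1 <;> by_cases h2 : m = k.2 <;>
      by_cases hk : k.2 = k.1 <;>
      simp only [h1, h2, hk, if_pos, PySem.Set.mem_add] <;>
      constructor <;> intro h <;> aesop

theorem pvB_adj_mem (keys : List (Int × Int)) (m t : Int) :
    t ∈ (pvB_adj keys).getD m [] ↔ ∃ k ∈ keys, (m = k.1 ∧ t = k.2) ∨ (m = k.2 ∧ t = k.1) := by
  simpa [pvB_adj] using pvB_adj_mem_aux keys PySem.Dict.empty m t

-- B's per-level set: membership characterisation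
theorem pvB_found_mem_t (tset : PySem.Set Int)
    (j : List Int) (ts : List Int) (found : PySem.Set (List Int)) (x : List Int) :
    x ∈ ts.foldl (fun found t =>
        if t ∈ tset ∧ t ∉ j then PySem.Set.add found (PySem.List.sorted (j ++ [t]) (fun x => x) false)
        else found) found ↔
      x ∈ found ∨ ∃ t ∈ ts, t ∈ tset ∧ t ∉ j ∧ x = pvNew j t := by
  induction ts generalizing found with
  | nil => simp
  | cons t ts ih =>
    simp only [List.foldl_cons]
    split_ifs with hc
    · rw [ih]
      simp only [PySem.Set.mem_add, List.mem_cons, pvNew]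
      constructor
      · rintro ((h | rfl) | ⟨t', ht', rest⟩)
        · exact Or.inl h
        · exact Or.inr ⟨t, Or.inl rfl, hc.1, hc.2, rfl⟩
        · exact Or.inr ⟨t', Or.inr ht', rest⟩
      · rintro (h | ⟨t', ht' | ht', h1, h2, rfl⟩)
        · exact Or.inl (Or.inl h)
        · subst ht'; exact Or.inl (Or.inr rfl)
        · exact Or.inr ⟨t', ht', h1, h2, rfl⟩
    · rw [ih]
      simp only [List.mem_cons]
      constructor
      · rintro (h | ⟨t', ht', rest⟩)
        · exact Or.inl h
        · exact Or.inr ⟨t', Or.inr ht', rest⟩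
      · rintro (h | ⟨t', ht' | ht', h1, h2, hx⟩)
        · exact Or.inl h
        · exact absurd ⟨h1, h2⟩ (ht' ▸ hc)
        · exact Or.inr ⟨t', ht', h1, h2, hx⟩

theorem pvB_found_mem_m (adj : PySem.Dict Int (PySem.Set Int)) (tset : PySem.Set Int)
    (j : List Int) (ms : List Int) (found : PySem.Set (List Int)) (x : List Int) :
    x ∈ ms.foldl (fun found m =>
        (adj.getD m []).foldl (fun found t =>
          if t ∈ tset ∧ t ∉ j then PySem.Set.add found (PySem.List.sorted (j ++ [t]) (fun x => x) false)
          else found) found) found ↔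
      x ∈ found ∨ ∃ m ∈ ms, ∃ t ∈ adj.getD m [], t ∈ tset ∧ t ∉ j ∧ x = pvNew j t := by
  induction ms generalizing found with
  | nil => simp
  | cons m ms ih =>
    simp only [List.foldl_cons]
    rw [ih, pvB_found_mem_t]
    simp only [List.mem_cons]
    constructor
    · rintro ((h | ⟨t, ht, rest⟩) | ⟨m', hm', rest⟩)
      · exact Or.inl h
      · exact Or.inr ⟨m, Or.inl rfl, t, ht, rest⟩
      · exact Or.inr ⟨m', Or.inr hm', rest⟩
    · rintro (h | ⟨m', hm' | hm', rest⟩)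
      · exact Or.inl (Or.inl h)
      · subst hm'; exact Or.inl (Or.inr rest)
      · exact Or.inr ⟨m', hm', rest⟩

theorem pvB_found_mem_aux (adj : PySem.Dict Int (PySem.Set Int)) (tset : PySem.Set Int)
    (prev : List (List Int)) (found : PySem.Set (List Int)) (x : List Int) :
    x ∈ prev.foldl (fun found j =>
        j.foldl (fun found m =>
          (adj.getD m []).foldl (fun found t =>
            if t ∈ tset ∧ t ∉ j then PySem.Set.add found (PySem.List.sorted (j ++ [t]) (fun x => x) false)
            else found) found) found) found ↔
      x ∈ found ∨ ∃ j ∈ prev, ∃ m ∈ j, ∃ t ∈ adj.getD m [], t ∈ tset ∧ t ∉ j ∧ x = pvNew j t := by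
  induction prev generalizing found with
  | nil => simp
  | cons j js ih =>
    simp only [List.foldl_cons]
    rw [ih, pvB_found_mem_m]
    simp only [List.mem_cons]
    constructor
    · rintro ((h | ⟨m, hm, rest⟩) | ⟨j', hj', rest⟩)
      · exact Or.inl h
      · exact Or.inr ⟨j, Or.inl rfl, m, hm, rest⟩
      · exact Or.inr ⟨j', Or.inr hj', rest⟩
    · rintro (h | ⟨j', hj' | hj', rest⟩)
      · exact Or.inl (Or.inl h)
      · subst hj'; exact Or.inl (Or.inr rest)
      · exact Or.inr ⟨j', hj', rest⟩

theorem pvB_found_mem (adj : PySem.Dict Int (PySem.Set Int)) (tset : PySem.Set Int)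
    (prev : List (List Int)) (x : List Int) :
    x ∈ pvB_found adj tset prev ↔
      ∃ j ∈ prev, ∃ m ∈ j, ∃ t ∈ adj.getD m [], t ∈ tset ∧ t ∉ j ∧ x = pvNew j t := by
  simpa [pvB_found] using pvB_found_mem_aux adj tset prev PySem.Set.empty x

theorem pvB_found_nodup_t (tset : PySem.Set Int) (j : List Int) (ts : List Int)
    (found : PySem.Set (List Int)) (h : found.Nodup) :
    (ts.foldl (fun found t =>
        if t ∈ tset ∧ t ∉ j then PySem.Set.add found (PySem.List.sorted (j ++ [t]) (fun x => x) false)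
        else found) found).Nodup := by
  induction ts generalizing found with
  | nil => simpa using h
  | cons t ts ih =>
    simp only [List.foldl_cons]
    split_ifs with hc
    · exact ih _ (PySem.Set.nodup_add _ _ h)
    · exact ih _ h

theorem pvB_found_nodup_m (adj : PySem.Dict Int (PySem.Set Int)) (tset : PySem.Set Int)
    (j : List Int) (ms : List Int) (found : PySem.Set (List Int)) (h : found.Nodup) :
    (ms.foldl (fun found m =>
        (adj.getD m []).foldl (fun found t =>
          if t ∈ tset ∧ t ∉ j then PySem.Set.add found (PySem.List.sorted (j ++ [t]) (fun x => x) false)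
          else found) found) found).Nodup := by
  induction ms generalizing found with
  | nil => simpa using h
  | cons m ms ih => exact ih _ (pvB_found_nodup_t _ _ _ _ h)

theorem pvB_found_nodup (adj : PySem.Dict Int (PySem.Set Int)) (tset : PySem.Set Int)
    (prev : List (List Int)) : (pvB_found adj tset prev).Nodup := by
  unfold pvB_found
  generalize hf : (PySem.Set.empty : PySem.Set (List Int)) = found
  have h : found.Nodup := by rw [← hf]; exact List.nodup_nil
  clear hf
  induction prev generalizing found with
  | nil => simpa using h
  | cons j js ih => exact ih _ (pvB_found_nodup_m _ _ _ _ _ h)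

-- the two DecidableLT instances on List Int (core vs LinearOrder) are equal
theorem pv_sorted_congr (xs : List (List Int)) :
    @PySem.List.sorted (List Int) (List Int) List.instLT (fun a b => a.decidableLT b) xs (fun x => x) false
      = @PySem.List.sorted (List Int) (List Int) List.instLinearOrder.toLT LinearOrder.toDecidableLT xs (fun x => x) false := by
  have hdec : (fun (a b : List Int) => a.decidableLT b) = (LinearOrder.toDecidableLT : DecidableLT (List Int)) :=
    funext fun a => funext fun b => Subsingleton.elim _ _
  rw [hdec]

-- the per-level core: A's level equals B's level from the same previous level
theorem pv_level_eq (tables : List Int) (keys : List (Int × Int)) (prev : List (List Int)) :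
    pvA_level tables (keys.map (fun k => [k.1, k.2])) prev =
      pvB_level (pvB_adj keys) (PySem.Set.ofList tables) prev := by
  rw [pvA_level_eq, pvB_level, pv_sorted_congr, pv_sorted_congr]
  apply PySem.List.sorted_eq_sorted_of_perm _ _ _ (fun a b h => h)
  rw [List.perm_ext_iff_of_nodup (pvA_raw_nodup _ _ _) (pvB_found_nodup _ _ _)]
  intro x
  rw [pvA_raw_mem, pvB_found_mem]
  constructor
  · rintro ⟨t, ht, j, hj, hnt, hx, r, hr, hc⟩
    obtain ⟨k, hk, rfl⟩ := List.mem_map.1 hr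
    rw [pvCondA_pair] at hc
    rcases hc with ⟨rfl, hbj⟩ | ⟨rfl, haj⟩
    · exact ⟨j, hj, k.2, hbj, k.1, (pvB_adj_mem keys k.2 k.1).2 ⟨k, hk, Or.inr ⟨rfl, rfl⟩⟩,
        (PySem.Set.mem_ofList _ _).2 ht, hnt, hx⟩
    · exact ⟨j, hj, k.1, haj, k.2, (pvB_adj_mem keys k.1 k.2).2 ⟨k, hk, Or.inl ⟨rfl, rfl⟩⟩,
        (PySem.Set.mem_ofList _ _).2 ht, hnt, hx⟩
  · rintro ⟨j, hj, m, hm, t, hadj, htset, hnt, hx⟩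
    obtain ⟨k, hk, hc⟩ := (pvB_adj_mem keys m t).1 hadj
    refine ⟨t, (PySem.Set.mem_ofList _ _).1 htset, j, hj, hnt, hx, [k.1, k.2], List.mem_map_of_mem hk, ?_⟩
    rw [pvCondA_pair]
    rcases hc with ⟨rfl, rfl⟩ | ⟨rfl, rfl⟩
    · exact Or.inr ⟨rfl, hm⟩
    · exact Or.inl ⟨rfl, hm⟩

-- the outer level loop: A's dict fold and B's (dict, prev) fold stay in step
theorem pv_outer (tables : List Int) (keys : List (Int × Int)) (m : Nat) :
    ∀ (a : Int) (dA : PySem.Dict Int (List (List Int))) (prevB : List (List Int)),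
      prevB = dA.getD (a - 1) [] →
      ((PySem.List.pyRange a (a + (m : Int)) 1).foldl
          (fun joins nJ => joins.insert nJ (pvA_level tables (keys.map (fun k => [k.1, k.2])) (joins.getD (nJ - 1) [])))
          dA)
        =
      ((PySem.List.pyRange a (a + (m : Int)) 1).foldl
          (fun (st : PySem.Dict Int (List (List Int)) × List (List Int)) level =>
            let prev' := pvB_level (pvB_adj keys) (PySem.Set.ofList tables) st.2
            (st.1.insert level prev', prev'))
          (dA, prevB)).1 := by
  induction m with
  | zero =>
    intro a dA prevB hprev
    rw [PySem.List.pyRange_one_eq_nil (by omega)]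
    rfl
  | succ m ih =>
    intro a dA prevB hprev
    rw [PySem.List.pyRange_one_cons (by omega)]
    simp only [List.foldl_cons]
    have hstep : pvA_level tables (keys.map (fun k => [k.1, k.2])) (dA.getD (a - 1) []) =
        pvB_level (pvB_adj keys) (PySem.Set.ofList tables) prevB := by
      rw [hprev, pv_level_eq]
    have hrange : a + ((m + 1 : Nat) : Int) = (a + 1) + (m : Int) := by push_cast; ring
    rw [hrange, hstep]
    exact ih (a + 1) _ _
      (by rw [show a + 1 - 1 = a from by ring, PySem.Dict.getD_insert_self])

-- ===== VERDICT (by name: the statement is the Claim_ definition above) =====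
theorem generatePossibleJoins_spec : Claim_equal_generatePossibleJoins := by
  intro tables relations n _
  show generatePossibleJoins tables relations n = generatePossibleJoins_alt tables relations n
  simp only [generatePossibleJoins, generatePossibleJoins_alt]
  rw [PySem.List.foldl_append_singleton_eq_map (fun k => [k.1, k.2]) (pvKeys relations) []]
  simp only [List.nil_append]
  by_cases hn : n + 1 ≤ 3
  · rw [PySem.List.pyRange_one_eq_nil hn]
    rfl
  · have h3 : n + 1 = 3 + ((n + 1 - 3).toNat : Int) := by omega
    rw [h3, pv_outer tables (pvKeys relations) (n + 1 - 3).toNat 3 _ _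
      (by rw [show (3 : Int) - 1 = 2 from by norm_num, PySem.Dict.getD_insert_self])]
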